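-- pv_equiv track=rewrite | github.com/Vishwa-Shah11/IntroToPython | Prereq_courses.py | pinnacle
-- ===== SOURCE A (Python) =====
-- def pinnacle(D):
--     S = set()
--     for main_1 in D:
--         flag = True
--         for main_2 in D:
--             if main_1 in D[main_2]:
--                 flag = False
--                 break
--         if flag:
--             S.add(main_1)
--     return S
-- ===== SOURCE B (Python) =====
-- def pinnacle(D):
--     S = set(D)
--     for v in D.values():
--         S.difference_update(v)
--     return S
-- ===== Notes on version B (the rewrite author's own statement) =====
-- stated objective: faster
-- what changed: Instead of testing each key against every value-list with a flag/break nested key-by-key scan, B starts from the full key set and makes one pass over the value-lists, removing every key seen in any list (set difference-update), eliminating the nested loop.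
import Mathlib
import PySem

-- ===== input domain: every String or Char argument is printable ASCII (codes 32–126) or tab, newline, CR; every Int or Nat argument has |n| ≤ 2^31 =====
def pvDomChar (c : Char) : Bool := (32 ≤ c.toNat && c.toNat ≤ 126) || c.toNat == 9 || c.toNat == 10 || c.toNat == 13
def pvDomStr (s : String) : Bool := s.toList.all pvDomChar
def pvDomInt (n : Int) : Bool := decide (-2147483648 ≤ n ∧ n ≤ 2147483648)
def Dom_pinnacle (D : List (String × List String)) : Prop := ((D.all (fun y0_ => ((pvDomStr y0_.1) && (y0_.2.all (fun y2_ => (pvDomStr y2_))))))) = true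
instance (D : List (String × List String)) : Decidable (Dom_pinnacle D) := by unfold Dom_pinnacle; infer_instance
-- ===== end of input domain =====

-- B replaces A's nested key-vs-every-value-list scan (flag/break) with one pass over the
-- value-lists that removes seen keys from the full key set (set difference); objective: simpler.


-- ===== PORT A =====
-- the association list is the Python dict: materialise it as a PySem.Dict first
-- (dict(pairs): first-occurrence position, last value), then transliterate A's loops
def pinnacle (D : List (String × List String)) : List String :=
  let d := PySem.Dict.ofList D
  -- for main_1 in D: flag = True; for main_2 in D: if main_1 in D[main_2]: flag = False; break
  -- (the inner loop with break computes exactly 'any')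
  d.keys.foldl
    (fun S main1 =>
      if d.keys.any (fun main2 => (d.getD main2 []).contains main1) then S
      else PySem.Set.add S main1)
    PySem.Set.empty

-- ===== PORT B =====
def pinnacle_alt (D : List (String × List String)) : List String :=
  let d := PySem.Dict.ofList D
  -- S = set(D); for v in D.values(): S.difference_update(v); return S
  d.values.foldl (fun S v => PySem.Set.diff S v) (PySem.Set.ofList d.keys)

-- ===== PRECONDITION & SPEC =====
def Spec_pinnacle (D : List (String × List String)) (out : List String) : Prop := out = pinnacle_alt D
instance (D : List (String × List String)) (out : List String) : Decidable (Spec_pinnacle D out) := by unfold Spec_pinnacle; infer_instance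

-- ===== CLAIM (what is proved, stated in full; the proofs are below) =====
def Claim_equal_pinnacle : Prop := ∀ (D : List (String × List String)), Dom_pinnacle D → Spec_pinnacle D (pinnacle D)

-- ===== LEMMAS AND PROOFS =====

-- A's loop over a nodup key list, starting from a set disjoint from it, appends the surviving keys
theorem foldl_add_if_filter (p : String → Bool) :
    ∀ (K : List String) (S : PySem.Set String), K.Nodup → (∀ x ∈ K, x ∉ S) →
      K.foldl (fun S k => if p k then S else PySem.Set.add S k) S
        = S ++ K.filter (fun k => !p k) := by
  intro K
  induction K with
  | nil => intro S _ _; simp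
  | cons k K ih =>
    intro S hnd hdisj
    simp only [List.foldl_cons, List.filter_cons]
    by_cases hp : p k = true
    · simp only [hp, if_true, Bool.not_true, Bool.false_eq_true, if_false]
      exact ih S (List.Nodup.of_cons hnd) (fun x hx => hdisj x (List.mem_cons_of_mem _ hx))
    · have hp' : p k = false := by simpa using hp
      have hkS : PySem.Set.add S k = S ++ [k] := by
        have hk : k ∉ S := hdisj k List.mem_cons_self
        unfold PySem.Set.add PySem.Set.contains
        simp [hk]
      simp only [hp', Bool.false_eq_true, if_false, Bool.not_false, if_true, hkS]
      rw [ih (S ++ [k]) (List.Nodup.of_cons hnd)]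
      · simp
      · intro x hx
        simp only [List.mem_append, List.mem_singleton]
        rintro (h | rfl)
        · exact hdisj x (List.mem_cons_of_mem _ hx) h
        · exact (List.nodup_cons.mp hnd).1 hx

-- B's difference-update loop filters the start set by "not seen in any value-list"
theorem foldl_diff_filter :
    ∀ (V : List (List String)) (S : List String),
      V.foldl (fun S v => PySem.Set.diff S v) S
        = S.filter (fun x => !V.any (fun v => v.contains x)) := by
  intro V
  induction V with
  | nil => intro S; simp
  | cons v V ih =>
    intro S
    simp only [List.foldl_cons]
    rw [ih]
    show (PySem.Set.diff S v).filter _ = _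
    unfold PySem.Set.diff
    rw [List.filter_filter]
    apply List.filter_congr
    intro x _
    simp only [List.any_cons, Bool.not_or, PySem.Set.contains]
    rw [Bool.and_comm]

theorem ofList_nodup (K : List String) (h : K.Nodup) : PySem.Set.ofList K = K := by
  show PySem.Set.update [] K = K
  rw [PySem.Set.update_eq_append_of_disjoint [] K h (by simp)]
  simp

-- ===== VERDICT (by name: the statement is the Claim_ definition above) =====
theorem pinnacle_spec : Claim_equal_pinnacle := by
  intro D _
  unfold Spec_pinnacle pinnacle pinnacle_alt
  set d := PySem.Dict.ofList D with hd
  have hnd : d.keys.Nodup := PySem.Dict.nodup_keys_ofList D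
  rw [foldl_add_if_filter _ d.keys PySem.Set.empty hnd (by simp [PySem.Set.empty])]
  rw [foldl_diff_filter d.values (PySem.Set.ofList d.keys)]
  rw [ofList_nodup d.keys hnd]
  rw [PySem.Dict.values_eq_map_keys d hnd []]
  simp [List.any_map, Function.comp_def]
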